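-- pv_equiv track=rewrite | github.com/tqmsh/LC | greedy/P1209 [USACO1.3] 修理牛棚 Barn Repair.py | min_board_length
-- ===== SOURCE A (Python) =====
-- from typing import List
--
-- def min_board_length(m: int, stalls: List[int]) -> int:
--     # Case 1: 足够
--     if m >= len(stalls): return len(stalls)
--     # Case 2: 不够，得拆
--     stalls.sort()
--     # [stalls[0], stalls[-1]]
--     ans = stalls[-1] - stalls[0] + 1
--     # 正难则反，假装一个长条，有一会断开 m - 1 块
--
--     # (..., stalls[i - 1]] (stalls[i - 1], stalls[i]) = gap [stalls [i], ...)
--     gaps = [stalls[i] - stalls[i - 1] - 1 for i in range(1, len(stalls))]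
--     # 贪心，
--     gaps.sort(reverse = 1)
--     for i in range(m - 1): ans -= gaps[i]
--     return ans
-- ===== SOURCE B (Python) =====
-- from typing import List
--
-- def min_board_length(m: int, stalls: List[int]) -> int:
--     # Selection instead of sorting the gaps: quickselect-style recursive
--     # partitioning computes the sum of the m-1 largest gaps directly.
--     if m >= len(stalls):
--         return len(stalls)
--     stalls.sort()
--     gaps = [b - a - 1 for a, b in zip(stalls, stalls[1:])]
--     return stalls[-1] - stalls[0] + 1 - _top_sum(gaps, m - 1)
--
-- def _top_sum(xs: List[int], k: int) -> int:
--     # sum of the k largest elements of xs, by three-way partition around a pivot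
--     if k <= 0:
--         return 0
--     if k >= len(xs):
--         return sum(xs)
--     p = xs[len(xs) // 2]
--     hi = [x for x in xs if x > p]
--     if k <= len(hi):
--         return _top_sum(hi, k)
--     eq = [x for x in xs if x == p]
--     if k <= len(hi) + len(eq):
--         return sum(hi) + (k - len(hi)) * p
--     lo = [x for x in xs if x < p]
--     return sum(hi) + sum(eq) + _top_sum(lo, k - len(hi) - len(eq))
-- ===== Notes on version B (the rewrite author's own statement) =====
-- stated objective: alternative
-- what changed: B never sorts the gap list: it computes the sum of the m-1 largest gaps by a recursive quickselect-style three-way partition around a pivot (recursing only into the side that contains the k-th largest), instead of A's reverse-sort of the gaps followed by an indexed loop subtracting the first m-1 entries.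
import Mathlib
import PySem

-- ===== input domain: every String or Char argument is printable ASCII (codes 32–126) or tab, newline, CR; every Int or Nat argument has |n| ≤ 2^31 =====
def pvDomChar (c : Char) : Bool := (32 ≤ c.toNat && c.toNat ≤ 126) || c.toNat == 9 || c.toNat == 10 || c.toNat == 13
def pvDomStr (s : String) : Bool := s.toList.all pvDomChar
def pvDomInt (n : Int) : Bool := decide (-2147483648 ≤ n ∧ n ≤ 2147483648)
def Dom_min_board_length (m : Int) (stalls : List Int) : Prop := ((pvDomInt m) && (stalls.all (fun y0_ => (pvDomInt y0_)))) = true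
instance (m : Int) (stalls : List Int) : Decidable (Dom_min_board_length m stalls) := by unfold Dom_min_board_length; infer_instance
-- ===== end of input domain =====

-- B selects the m-1 largest gaps by recursive quickselect-style three-way partitioning
-- (no sort of the gap list) instead of A's reverse-sort + indexed subtraction loop;
-- both sort `stalls` in place (mutation identical); return values proved equal on Pre_.


-- ===== PORT A =====
def min_board_length (m : Int) (stalls : List Int) : Int :=
  if m ≥ PySem.List.len stalls then PySem.List.len stalls
  else
    let s := PySem.List.sorted stalls (fun x => x) false
    let ans := PySem.List.pyGetD s (-1) 0 - PySem.List.pyGetD s 0 0 + 1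
    let gaps := (PySem.List.pyRange 1 (PySem.List.len s) 1).map
      (fun i => PySem.List.pyGetD s i 0 - PySem.List.pyGetD s (i - 1) 0 - 1)
    let gapsSorted := PySem.List.sorted gaps (fun x => x) true
    (PySem.List.pyRange 0 (m - 1) 1).foldl (fun a i => a - PySem.List.pyGetD gapsSorted i 0) ans

-- ===== PORT B =====
-- port of Source B's _top_sum: sum of the k largest elements by three-way partition around a
-- pivot (the pivot index len(xs)//2 is always in range in its branch — len(xs) ≥ 2 there —
-- so List.getD is exact for xs[len(xs) // 2])
def topSum (xs : List Int) (k : Int) : Int :=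
  if _h1 : k ≤ 0 then 0
  else if _h2 : k ≥ (xs.length : Int) then xs.sum
  else
    let p := xs.getD (xs.length / 2) 0
    let hi := xs.filter (fun x => decide (p < x))
    if _h3 : k ≤ (hi.length : Int) then topSum hi k
    else
      let eq := xs.filter (fun x => decide (x = p))
      if k ≤ (hi.length : Int) + (eq.length : Int) then
        hi.sum + (k - (hi.length : Int)) * p
      else
        let lo := xs.filter (fun x => decide (x < p))
        hi.sum + eq.sum + topSum lo (k - (hi.length : Int) - (eq.length : Int))
termination_by xs.length
decreasing_by
  · rw [List.unattach_filter (g := fun x => decide (xs.getD (xs.length / 2) 0 < x))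
        (hf := fun x h => rfl), List.unattach_attach]
    refine List.length_filter_lt_length_iff_exists.mpr
      ⟨xs.getD (xs.length / 2) 0, ?_, by simp⟩
    rw [List.getD_eq_getElem xs 0 (by omega)]
    exact List.getElem_mem _
  · rw [List.unattach_filter (g := fun x => decide (x < xs.getD (xs.length / 2) 0))
        (hf := fun x h => rfl), List.unattach_attach]
    refine List.length_filter_lt_length_iff_exists.mpr
      ⟨xs.getD (xs.length / 2) 0, ?_, by simp⟩
    rw [List.getD_eq_getElem xs 0 (by omega)]
    exact List.getElem_mem _



def min_board_length_alt (m : Int) (stalls : List Int) : Int :=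
  if m ≥ PySem.List.len stalls then PySem.List.len stalls
  else
    let s := PySem.List.sorted stalls (fun x => x) false
    let gaps := (s.zip (PySem.List.slice s (some 1) none)).map (fun p => p.2 - p.1 - 1)
    PySem.List.pyGetD s (-1) 0 - PySem.List.pyGetD s 0 0 + 1 - topSum gaps (m - 1)

-- ===== PRECONDITION & SPEC =====
-- Pre_ excludes exactly the inputs (stalls = [] with m < 0) on which A raises IndexError at stalls[-1].
def Pre_min_board_length (m : Int) (stalls : List Int) : Prop := stalls ≠ [] ∨ 0 ≤ m
instance (m : Int) (stalls : List Int) : Decidable (Pre_min_board_length m stalls) := by unfold Pre_min_board_length; infer_instance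
def pvWitness_min_board_length : Int × List Int := (2, [1, 3, 7])

def Spec_min_board_length (m : Int) (stalls : List Int) (out : Int) : Prop := out = min_board_length_alt m stalls
instance (m : Int) (stalls : List Int) (out : Int) : Decidable (Spec_min_board_length m stalls out) := by unfold Spec_min_board_length; infer_instance

-- ===== CLAIM (what is proved, stated in full; the proofs are below) =====
def Claim_equal_min_board_length : Prop := ∀ (m : Int) (stalls : List Int), Dom_min_board_length m stalls → Pre_min_board_length m stalls → Spec_min_board_length m stalls (min_board_length m stalls)

-- ===== LEMMAS AND PROOFS =====

-- the subtracting loop `for i in range(k): ans -= xs[i]` is `init - sum of the first k`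
theorem pvSubLoop (xs : List Int) (k : Nat) (hk : k ≤ xs.length) (init : Int) :
    (PySem.List.pyRange 0 (k : Int) 1).foldl (fun a i => a - PySem.List.pyGetD xs i 0) init
      = init - (xs.take k).sum := by
  induction k generalizing init with
  | zero => simp [PySem.List.pyRange_one_eq_nil]
  | succ n ih =>
    have hn : n < xs.length := by omega
    have hc : ((n+1 : Nat) : Int) = (n : Int) + 1 := by push_cast; ring
    have ht : xs.take (n+1) = xs.take n ++ [xs[n]] := by
      rw [List.take_add_one]; simp [List.getElem?_eq_getElem hn]
    rw [hc, PySem.List.pyRange_one_succ_right (Int.natCast_nonneg n), List.foldl_append,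
        ih (by omega), ht]
    simp only [List.foldl_cons, List.foldl_nil, List.sum_append, List.sum_cons, List.sum_nil,
      PySem.List.pyGetD_natCast, List.getD_eq_getElem?_getD, List.getElem?_eq_getElem hn]
    simp; ring

-- A's index-built gap list is B's zip-built gap list
theorem pvGapsEq (s : List Int) :
    (PySem.List.pyRange 1 (PySem.List.len s) 1).map
        (fun i => PySem.List.pyGetD s i 0 - PySem.List.pyGetD s (i - 1) 0 - 1)
      = (s.zip s.tail).map (fun p => p.2 - p.1 - 1) := by
  apply List.ext_getElem
  · simp [PySem.List.length_pyRange_one, PySem.List.len_eq, List.length_tail]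
  · intro j h1 h2
    have hlen : j + 1 < s.length := by
      simp [PySem.List.length_pyRange_one, PySem.List.len_eq] at h1; omega
    simp [PySem.List.getElem_pyRange_one, List.getElem_zip, List.getElem_tail]
    have e1 : (1 : Int) + (j : Int) = ((j + 1 : Nat) : Int) := by push_cast; ring
    rw [e1, PySem.List.pyGetD_natCast]
    simp [List.getD_eq_getElem?_getD, List.getElem?_eq_getElem hlen,
      List.getElem?_eq_getElem (show j < s.length by omega)]

-- descending uniqueness
theorem pvSortDesc (xs L : List Int) (hperm : L.Perm xs) (hp : L.Pairwise (fun a b => b ≤ a)) :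
    PySem.List.sorted xs (fun x => x) true = L := by
  have h := PySem.List.eq_of_perm_of_pairwise_le_of_injective (fun x : Int => x)
    (fun a b h => h)
    (l₁ := (PySem.List.sorted xs (fun x => x) true).reverse)
    (l₂ := L.reverse)
    (((List.reverse_perm _).trans (PySem.List.sorted_perm xs (fun x => x) true)).trans
      (hperm.symm.trans (List.reverse_perm L).symm))
    (by simpa [List.pairwise_reverse] using PySem.List.sorted_pairwise_rev xs (fun x => x))
    (by simpa [List.pairwise_reverse] using hp)
  calc PySem.List.sorted xs (fun x => x) true
      = ((PySem.List.sorted xs (fun x => x) true).reverse).reverse := by simp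
    _ = (L.reverse).reverse := by rw [h]
    _ = L := by simp


theorem pvSortDDecomp (xs : List Int) (p : Int) :
    PySem.List.sorted xs (fun x => x) true
      = PySem.List.sorted (xs.filter (fun x => decide (p < x))) (fun x => x) true
        ++ xs.filter (fun x => decide (x = p))
        ++ PySem.List.sorted (xs.filter (fun x => decide (x < p))) (fun x => x) true := by
  have hmemhi : ∀ x ∈ PySem.List.sorted (xs.filter (fun x => decide (p < x))) (fun x => x) true,
      p < x := by
    intro x hx
    rw [PySem.List.mem_sorted] at hx
    simpa using (List.mem_filter.mp hx).2
  have hmemeq : ∀ x ∈ xs.filter (fun x => decide (x = p)), x = p := by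
    intro x hx; simpa using (List.mem_filter.mp hx).2
  have hmemlo : ∀ x ∈ PySem.List.sorted (xs.filter (fun x => decide (x < p))) (fun x => x) true,
      x < p := by
    intro x hx
    rw [PySem.List.mem_sorted] at hx
    simpa using (List.mem_filter.mp hx).2
  apply pvSortDesc
  · -- permutation to xs
    have heq : List.filter (fun x => decide (x = p)) (xs.filter (fun x => !decide (p < x)))
        = xs.filter (fun x => decide (x = p)) := by
      rw [List.filter_filter]
      apply List.filter_congr
      intro x _
      by_cases h : x = p <;> simp [h]
    have hlo : List.filter (fun x => !decide (x = p)) (xs.filter (fun x => !decide (p < x)))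
        = xs.filter (fun x => decide (x < p)) := by
      rw [List.filter_filter]
      apply List.filter_congr
      intro x _
      by_cases h : x = p
      · simp [h]
      · by_cases h2 : x < p <;> by_cases h3 : p < x <;> simp [h, h2, h3] <;> omega
    rw [List.append_assoc]
    refine List.Perm.trans
      ((PySem.List.sorted_perm _ _ _).append ((List.Perm.refl _).append (PySem.List.sorted_perm _ _ _)))
      (List.Perm.trans (List.Perm.append_left _ ?_) (List.filter_append_perm _ _))
    rw [← heq, ← hlo]
    exact List.filter_append_perm _ _
  · -- pairwise ≥
    rw [List.append_assoc, List.pairwise_append, List.pairwise_append]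
    refine ⟨by simpa using PySem.List.sorted_pairwise_rev _ (fun x : Int => x),
      ⟨List.pairwise_of_forall_mem_list (fun a ha b hb => by
          rw [hmemeq a ha, hmemeq b hb]),
        by simpa using PySem.List.sorted_pairwise_rev _ (fun x : Int => x),
        fun a ha b hb => le_of_lt (lt_of_lt_of_le (hmemlo b hb) (le_of_eq (hmemeq a ha).symm))⟩,
      fun a ha b hb => ?_⟩
    rcases List.mem_append.mp hb with h | h
    · exact le_of_lt (lt_of_le_of_lt (le_of_eq (hmemeq b h)) (hmemhi a ha))
    · exact le_of_lt (lt_trans (hmemlo b h) (hmemhi a ha))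


theorem pvTopSumAux : ∀ (n : Nat) (xs : List Int), xs.length ≤ n → ∀ (k : Int),
    topSum xs k = ((PySem.List.sorted xs (fun x => x) true).take k.toNat).sum := by
  intro n
  induction n with
  | zero =>
    intro xs hx k
    have hxs : xs = [] := List.eq_nil_of_length_eq_zero (by omega)
    subst hxs
    rw [topSum]
    have hs : PySem.List.sorted ([] : List Int) (fun x => x) true = [] := rfl
    split_ifs with h1 h2
    · simp [hs]
    · simp [hs]
    · exact absurd h2 (by simp; omega)
  | succ n ih =>
    intro xs hx k
    rw [topSum]
    simp only []
    split_ifs with h1 h2 h3 h4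
    · have hk : k.toNat = 0 := by omega
      simp [hk]
    · rw [List.take_of_length_le (by rw [PySem.List.length_sorted]; omega)]
      exact ((PySem.List.sorted_perm xs _ true).sum_eq).symm
    all_goals
      set p := xs.getD (xs.length / 2) 0 with hp
      have hpx : p ∈ xs := by
        rw [hp, List.getD_eq_getElem xs 0 (by omega)]
        exact List.getElem_mem _
    · -- recurse into hi
      have hhilt : (xs.filter (fun x => decide (p < x))).length < xs.length :=
        List.length_filter_lt_length_iff_exists.mpr ⟨_, hpx, by simp⟩
      rw [ih _ (by omega) k, pvSortDDecomp xs p, List.append_assoc, List.take_append]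
      have hz : k.toNat - (PySem.List.sorted (xs.filter (fun x => decide (p < x)))
          (fun x => x) true).length = 0 := by
        rw [PySem.List.length_sorted]; omega
      rw [hz]
      simp
    · -- stop inside eq
      rw [pvSortDDecomp xs p, List.append_assoc, List.take_append,
        List.take_of_length_le (by rw [PySem.List.length_sorted]; omega),
        List.take_append]
      have hz : k.toNat - (PySem.List.sorted (xs.filter (fun x => decide (p < x)))
          (fun x => x) true).length - (xs.filter (fun x => decide (x = p))).length = 0 := by
        rw [PySem.List.length_sorted]; omega
      rw [hz]
      have hsum : ((xs.filter (fun x => decide (x = p))).take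
            (k.toNat - (PySem.List.sorted (xs.filter (fun x => decide (p < x)))
              (fun x => x) true).length)).sum
          = (((xs.filter (fun x => decide (x = p))).take
            (k.toNat - (PySem.List.sorted (xs.filter (fun x => decide (p < x)))
              (fun x => x) true).length)).length : Int) * p := by
        rw [List.sum_eq_card_nsmul _ p (fun x hx => by
          have := List.mem_filter.mp (List.mem_of_mem_take hx)
          simpa using this.2)]
        simp
      simp only [List.sum_append]
      rw [hsum, (PySem.List.sorted_perm (xs.filter (fun x => decide (p < x))) _ true).sum_eq]
      have hlen : ((xs.filter (fun x => decide (x = p))).take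
            (k.toNat - (PySem.List.sorted (xs.filter (fun x => decide (p < x)))
              (fun x => x) true).length)).length
          = k.toNat - (xs.filter (fun x => decide (p < x))).length := by
        rw [List.length_take, PySem.List.length_sorted]; omega
      rw [hlen]
      have hc : ((k.toNat - (xs.filter (fun x => decide (p < x))).length : Nat) : Int)
          = k - ((xs.filter (fun x => decide (p < x))).length : Int) := by omega
      rw [hc]
      simp
    · -- recurse into lo
      have hlolt : (xs.filter (fun x => decide (x < p))).length < xs.length :=
        List.length_filter_lt_length_iff_exists.mpr ⟨_, hpx, by simp⟩
      rw [ih _ (by omega)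
          (k - ((xs.filter (fun x => decide (p < x))).length : Int)
            - ((xs.filter (fun x => decide (x = p))).length : Int)),
        pvSortDDecomp xs p, List.append_assoc, List.take_append,
        List.take_of_length_le (i := k.toNat)
          (l := PySem.List.sorted (xs.filter (fun x => decide (p < x))) (fun x => x) true)
          (by rw [PySem.List.length_sorted]; omega),
        List.take_append,
        List.take_of_length_le (l := xs.filter (fun x => decide (x = p)))
          (by rw [PySem.List.length_sorted]; omega)]
      simp only [List.sum_append]
      rw [(PySem.List.sorted_perm (xs.filter (fun x => decide (p < x))) _ true).sum_eq]
      have hnat : k.toNat - (PySem.List.sorted (xs.filter (fun x => decide (p < x)))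
            (fun x => x) true).length - (xs.filter (fun x => decide (x = p))).length
          = (k - ((xs.filter (fun x => decide (p < x))).length : Int)
            - ((xs.filter (fun x => decide (x = p))).length : Int)).toNat := by
        rw [PySem.List.length_sorted]; omega
      rw [hnat]
      ring

-- topSum computes the sum of the first k entries of the descending sort
theorem pvTopSum (xs : List Int) (k : Int) :
    topSum xs k = ((PySem.List.sorted xs (fun x => x) true).take k.toNat).sum :=
  pvTopSumAux xs.length xs le_rfl k

-- ===== VERDICT (by name: the statement is the Claim_ definition above) =====
theorem min_board_length_spec : Claim_equal_min_board_length := by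
  intro m stalls _ hpre
  unfold Spec_min_board_length min_board_length min_board_length_alt
  by_cases hge : m ≥ PySem.List.len stalls
  · rw [if_pos hge, if_pos hge]
  · rw [if_neg hge, if_neg hge]
    have hm : m < (stalls.length : Int) := by
      simp only [PySem.List.len_eq] at hge; omega
    have hne : stalls ≠ [] := by
      rcases hpre with h | h
      · exact h
      · intro he; rw [he] at hm; simp at hm; omega
    simp only []
    have hsne : PySem.List.sorted stalls (fun x => x) false ≠ [] := by
      rw [Ne, PySem.List.sorted_eq_nil_iff]; exact hne
    have hslen : (PySem.List.sorted stalls (fun x => x) false).length = stalls.length :=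
      PySem.List.length_sorted stalls (fun x => x) false
    rw [pvGapsEq, PySem.List.slice_from_one]
    have hg : (((PySem.List.sorted stalls (fun x => x) false).zip
        (PySem.List.sorted stalls (fun x => x) false).tail).map
          (fun p => p.2 - p.1 - 1)).length
        = (PySem.List.sorted stalls (fun x => x) false).length - 1 := by
      simp [List.length_zip, List.length_tail]
    have hk : (m - 1).toNat ≤ (PySem.List.sorted (((PySem.List.sorted stalls (fun x => x) false).zip
        (PySem.List.sorted stalls (fun x => x) false).tail).map (fun p => p.2 - p.1 - 1))
        (fun x => x) true).length := by
      rw [PySem.List.length_sorted, hg]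
      have := List.length_pos_of_ne_nil hsne
      omega
    by_cases h1 : 1 ≤ m
    · have h : m - 1 = (((m - 1).toNat : Nat) : Int) := (Int.toNat_of_nonneg (by omega)).symm
      rw [h, pvSubLoop _ _ hk, pvTopSum]
      simp
    · rw [PySem.List.pyRange_one_eq_nil (by omega), List.foldl_nil, pvTopSum,
        (show (m - 1).toNat = 0 by omega)]
      simp
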